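-- pv_equiv track=rewrite | github.com/SDET-SOLOMAN/code_wars_python | kata_7s/stanton_measure.py | stanton_measure2
-- ===== SOURCE A (Python) =====
-- def stanton_measure2(arr):
--     my_one_count = 0
--     for char in arr:
--         if char == 1:
--             my_one_count += 1
--
--     my_return_count = 0
--     for char in arr:
--         if char == my_one_count:
--             my_return_count += 1
--
--     return my_return_count
-- ===== SOURCE B (Python) =====
-- def stanton_measure2(arr):
--     runs = {}
--     prev = None
--     run_len = 0
--     for x in sorted(arr):
--         if x == prev:
--             run_len += 1
--         else:
--             if prev is not None:
--                 runs[prev] = run_len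
--             prev = x
--             run_len = 1
--     if prev is not None:
--         runs[prev] = run_len
--     return runs.get(runs.get(1, 0), 0)
-- ===== Notes on version B (the rewrite author's own statement) =====
-- stated objective: alternative
-- what changed: Sorts the array and run-length-encodes the sorted runs into a value->run-length table, then answers with two table lookups instead of A's two comparison scans.
import Mathlib
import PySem

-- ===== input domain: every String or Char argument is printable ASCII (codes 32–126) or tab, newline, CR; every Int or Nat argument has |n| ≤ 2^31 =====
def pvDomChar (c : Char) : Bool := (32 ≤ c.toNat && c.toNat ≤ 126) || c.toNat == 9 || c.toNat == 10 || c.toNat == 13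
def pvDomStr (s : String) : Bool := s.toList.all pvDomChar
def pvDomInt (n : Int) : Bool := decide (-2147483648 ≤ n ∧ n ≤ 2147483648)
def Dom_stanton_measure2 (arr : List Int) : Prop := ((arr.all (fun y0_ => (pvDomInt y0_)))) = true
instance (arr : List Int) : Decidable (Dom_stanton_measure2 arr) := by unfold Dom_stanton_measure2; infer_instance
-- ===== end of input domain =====

-- B sorts the array and run-length-encodes it into a value->run-length table, then answers by two lookups (alternative algorithm; not faster).


-- ===== PORT A =====
def stanton_measure2 (arr : List Int) : Int :=
  let my_one_count := arr.foldl (fun c char => if char == 1 then c + 1 else c) (0 : Int)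
  let my_return_count := arr.foldl (fun c char => if char == my_one_count then c + 1 else c) (0 : Int)
  my_return_count

-- ===== PORT B =====
-- B: sort, run-length-encode the sorted runs into a dict, two lookups.
def pvRleStep (st : PySem.Dict Int Int × Option Int × Int) (x : Int) :
    PySem.Dict Int Int × Option Int × Int :=
  if some x == st.2.1 then (st.1, st.2.1, st.2.2 + 1)
  else
    match st.2.1 with
    | some p => (st.1.insert p st.2.2, some x, 1)
    | none => (st.1, some x, 1)

def pvFinalize (st : PySem.Dict Int Int × Option Int × Int) : PySem.Dict Int Int :=
  match st.2.1 with
  | some p => st.1.insert p st.2.2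
  | none => st.1

def stanton_measure2_alt (arr : List Int) : Int :=
  let st := (PySem.List.sorted arr (fun x => x) false).foldl pvRleStep
    (PySem.Dict.empty, (none : Option Int), (0 : Int))
  let runs := pvFinalize st
  runs.getD (runs.getD 1 0) 0

-- ===== PRECONDITION & SPEC =====
def Spec_stanton_measure2 (arr : List Int) (out : Int) : Prop := out = stanton_measure2_alt arr
instance (arr : List Int) (out : Int) : Decidable (Spec_stanton_measure2 arr out) := by unfold Spec_stanton_measure2; infer_instance

-- ===== CLAIM (what is proved, stated in full; the proofs are below) =====
def Claim_equal_stanton_measure2 : Prop := ∀ (arr : List Int), Dom_stanton_measure2 arr → Spec_stanton_measure2 arr (stanton_measure2 arr)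

-- ===== LEMMAS AND PROOFS =====

-- A's counting fold equals List.count (cast to Int)
theorem pv_fold_count (v : Int) (arr : List Int) :
    arr.foldl (fun c char => if char == v then c + 1 else c) (0 : Int) = (arr.count v : Int) := by
  suffices h : ∀ (init : Int),
      arr.foldl (fun c char => if char == v then c + 1 else c) init = init + (arr.count v : Int) by
    simpa using h 0
  induction arr with
  | nil => intro init; simp
  | cons x xs ih =>
    intro init
    simp only [List.foldl_cons, List.count_cons, ih]
    by_cases hx : x = v <;> simp [hx, beq_iff_eq] <;> ring

-- core invariant: over a sorted tail whose elements all dominate the open run's value p,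
-- the finalized RLE dict looks up to run length + count
theorem pv_rle_core (v : Int) :
    ∀ (s : List Int), List.Pairwise (· ≤ ·) s →
      ∀ (d : PySem.Dict Int Int) (p n : Int), (∀ x ∈ s, p ≤ x) →
      (pvFinalize (s.foldl pvRleStep (d, some p, n))).getD v 0 =
        if v = p ∨ v ∈ s then (if v = p then n else 0) + (s.count v : Int) else d.getD v 0 := by
  intro s
  induction s with
  | nil =>
    intro _ d p n _
    simp [pvFinalize, PySem.Dict.getD_insert]
    by_cases hv : v = p <;> simp [hv]
  | cons x s ih =>
    intro hs d p n hle
    have hxs : ∀ y ∈ s, x ≤ y := fun y hy => (List.pairwise_cons.mp hs).1 y hy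
    have hs' : List.Pairwise (· ≤ ·) s := (List.pairwise_cons.mp hs).2
    have hpx : p ≤ x := hle x (List.mem_cons_self)
    by_cases hxp : x = p
    · subst hxp
      simp only [List.foldl_cons, pvRleStep, beq_iff_eq, Option.some.injEq, if_true, if_pos trivial]
      rw [ih hs' d x (n + 1) hxs]
      by_cases hv : v = x
      · simp [hv, List.count_cons]; push_cast; ring
      · have hv2 : ¬ x = v := fun h => hv h.symm
        simp [hv, hv2, List.count_cons, List.mem_cons]
    · have hplt : p < x := lt_of_le_of_ne hpx (fun h => hxp h.symm)
      have hpnots : p ∉ s := by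
        intro hmem
        exact absurd (hxs p hmem) (not_le.mpr hplt)
      simp only [List.foldl_cons, pvRleStep]
      rw [if_neg (by simp [hxp])]
      rw [ih hs' (d.insert p n) x 1 hxs]
      by_cases hvx : v = x
      · subst hvx
        simp [hxp, List.count_cons, List.mem_cons]
        push_cast; ring
      · have hxv : ¬ x = v := fun h => hvx h.symm
        by_cases hvp : v = p
        · subst hvp
          have hvnots : v ∉ s := hpnots
          simp [hvnots, hxv, List.count_cons, PySem.Dict.getD_insert,
            List.count_eq_zero.mpr hvnots]
          exact fun h => absurd h hvx
        · by_cases hvs : v ∈ s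
          · simp [hvs, hvx, hxv, hvp, List.count_cons, List.mem_cons]
          · simp [hvs, hvx, hxv, hvp, List.count_cons, List.mem_cons,
              PySem.Dict.getD_insert]

-- the RLE dict of a sorted list looks up to the count in that list
theorem pv_rle_getD (v : Int) (s : List Int) (hs : List.Pairwise (· ≤ ·) s) :
    (pvFinalize (s.foldl pvRleStep (PySem.Dict.empty, (none : Option Int), (0 : Int)))).getD v 0
      = (s.count v : Int) := by
  cases s with
  | nil => simp [pvFinalize, PySem.Dict.getD_empty]
  | cons x s =>
    have hxs : ∀ y ∈ s, x ≤ y := fun y hy => (List.pairwise_cons.mp hs).1 y hy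
    have hs' : List.Pairwise (· ≤ ·) s := (List.pairwise_cons.mp hs).2
    simp only [List.foldl_cons, pvRleStep]
    rw [if_neg (by simp)]
    rw [pv_rle_core v s hs' PySem.Dict.empty x 1 hxs]
    by_cases hvx : v = x
    · simp [hvx, List.count_cons]; push_cast; ring
    · have hxv : ¬ x = v := fun h => hvx h.symm
      by_cases hvs : v ∈ s
      · simp [hvx, hxv, hvs, List.count_cons]
      · simp [hvx, hxv, hvs, List.count_cons, PySem.Dict.getD_empty,
          List.count_eq_zero.mpr hvs]

theorem pv_alt_eq_count (arr : List Int) :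
    stanton_measure2_alt arr = ((arr.count ((arr.count 1 : Nat) : Int)) : Int) := by
  unfold stanton_measure2_alt
  have hs := PySem.List.sorted_pairwise arr (fun x => x) (κ := Int)
  have hperm := PySem.List.sorted_perm arr (fun x => x) false
  have hcount : ∀ w : Int, (PySem.List.sorted arr (fun x => x) false).count w = arr.count w :=
    fun w => hperm.count_eq w
  simp only [pv_rle_getD _ _ hs, hcount]

theorem stanton_measure2_spec : Claim_equal_stanton_measure2 := by
  intro arr _
  unfold Spec_stanton_measure2
  rw [pv_alt_eq_count]
  unfold stanton_measure2
  simp only [pv_fold_count]
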